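-- pv_equiv track=rewrite | github.com/meowdevhyerin/algorithm | swea_2805.py | make_check_matrix
-- ===== SOURCE A (Python) =====
-- def make_check_matrix(n):
--     check_matrix = [[0] * n for _ in range(n)]
--     center = n // 2
--     for i in range(n):
--         distance = abs(i - center)
--         start = distance
--         end = n - distance
--         for j in range(start, end):
--             check_matrix[i][j] = 1
--     return check_matrix
-- ===== SOURCE B (Python) =====
-- def make_check_matrix(n):
--     # Column-major construction: column j is an interval of rows of half-width
--     # min(j, n-1-j) around the center row; the matrix is the transpose of
--     # these columns (zip(*...)).
--     center = n // 2
--     def column(j):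
--         reach = min(j, n - 1 - j)
--         return [0] * (center - reach) + [1] * (2 * reach + 1) + [0] * (n - 1 - center - reach)
--     return [list(row) for row in zip(*(column(j) for j in range(n)))]
-- ===== Notes on version B (the rewrite author's own statement) =====
-- stated objective: alternative
-- what changed: B builds the matrix column-major -- column j is the interval of rows of half-width min(j, n-1-j) around the center row, assembled from zero/one blocks -- and transposes the columns with zip(*...), instead of A's pre-zeroed row matrix mutated by an inner row-filling index loop.
import Mathlib
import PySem

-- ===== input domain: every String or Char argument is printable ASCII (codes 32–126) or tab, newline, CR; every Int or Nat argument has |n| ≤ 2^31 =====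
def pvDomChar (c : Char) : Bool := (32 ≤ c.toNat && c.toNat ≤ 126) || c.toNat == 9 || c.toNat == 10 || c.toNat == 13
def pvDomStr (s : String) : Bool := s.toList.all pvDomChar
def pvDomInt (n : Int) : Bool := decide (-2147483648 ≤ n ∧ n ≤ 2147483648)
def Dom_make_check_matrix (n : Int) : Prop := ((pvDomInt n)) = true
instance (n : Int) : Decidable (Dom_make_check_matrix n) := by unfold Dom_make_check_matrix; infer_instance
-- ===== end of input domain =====

-- B builds the matrix column-major (each column is an interval of rows around the
-- center, decided per cell) and transposes the columns, instead of A's pre-zeroed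
-- row matrix mutated by an inner row-filling loop (alternative algorithm).
-- ===== PORT A =====
def make_check_matrix (n : Int) : List (List Int) :=
  let check_matrix : List (List Int) :=
    (PySem.List.pyRange 0 n 1).map (fun _ => PySem.List.pyRepeat [0] n)
  let center := PySem.Int.floordiv n 2
  (PySem.List.pyRange 0 n 1).foldl (fun m i =>
    let distance := |i - center|
    let start := distance
    let stop := n - distance
    (PySem.List.pyRange start stop 1).foldl (fun m j =>
      -- check_matrix[i][j] = 1 : indices i, j are nonnegative and in range here
      PySem.List.pySetD m i (PySem.List.pySetD (PySem.List.pyGetD m i []) j 1)) m) check_matrix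

-- ===== PORT B =====
-- zip(*columns) with every row turned into a list (Python's zip stops as soon as
-- any column is exhausted; with no columns it yields nothing).
def pvZipStar (cols : List (List Int)) : List (List Int) :=
  if h : cols.isEmpty || cols.any List.isEmpty then []
  else cols.map (fun c => c.headD 0) :: pvZipStar (cols.map List.tail)
termination_by (cols.headD []).length
decreasing_by
  simp only [Bool.or_eq_true, List.isEmpty_iff, List.any_eq_true, not_or, not_exists] at h
  obtain ⟨h1, h2⟩ := h
  cases cols with
  | nil => exact absurd rfl h1
  | cons c rest =>
    have hc : c ≠ [] := by
      intro he
      exact (h2 c) ⟨List.mem_cons_self, by simp [he]⟩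
    have hc' : 0 < c.length := List.length_pos_iff.mpr hc
    simp
    omega

def make_check_matrix_alt (n : Int) : List (List Int) :=
  let center := PySem.Int.floordiv n 2
  let column : Int → List Int := fun j =>
    let reach := min j (n - 1 - j)
    PySem.List.pyRepeat [0] (center - reach) ++ PySem.List.pyRepeat [1] (2 * reach + 1)
      ++ PySem.List.pyRepeat [0] (n - 1 - center - reach)
  pvZipStar ((PySem.List.pyRange 0 n 1).map column)

-- ===== PRECONDITION & SPEC =====
def Spec_make_check_matrix (n : Int) (out : List (List Int)) : Prop := out = make_check_matrix_alt n
instance (n : Int) (out : List (List Int)) : Decidable (Spec_make_check_matrix n out) := by unfold Spec_make_check_matrix; infer_instance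

-- ===== CLAIM (what is proved, stated in full; the proofs are below) =====
def Claim_equal_make_check_matrix : Prop := ∀ (n : Int), Dom_make_check_matrix n → Spec_make_check_matrix n (make_check_matrix n)

-- ===== LEMMAS AND PROOFS =====

-- The inner matrix loop only rewrites row t: it equals setting row t to the row-level fold.
lemma matrix_inner (js : List Int) : ∀ (m : List (List Int)) (t : Nat), t < m.length →
    js.foldl (fun acc j => PySem.List.pySetD acc (t : Int)
        (PySem.List.pySetD (PySem.List.pyGetD acc (t : Int) []) j 1)) m
      = m.set t (js.foldl (fun r j => PySem.List.pySetD r j 1) (m.getD t [])) := by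
  induction js with
  | nil =>
    intro m t ht
    simp only [List.foldl_nil]
    rw [List.getD_eq_getElem m [] ht, List.set_getElem_self]
  | cons j js ih =>
    intro m t ht
    rw [List.foldl_cons,
        ih (PySem.List.pySetD m (t : Int)
            (PySem.List.pySetD (PySem.List.pyGetD m (t : Int) []) j 1)) t
          (by simp [ht])]
    simp only [PySem.List.pySetD_natCast, PySem.List.pyGetD_natCast, List.foldl_cons]
    simp [ht, List.set_set, List.getD_eq_getElem?_getD]

-- The outer loop over the fresh row-per-index matrix is a map over the rows.
lemma outer_fold (n : Int) (js : Int → List Int) (row0 : List Int) :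
    ∀ (k : Nat), (k : Int) ≤ n →
    (PySem.List.pyRange 0 (k : Int) 1).foldl
        (fun m i => (js i).foldl (fun acc j => PySem.List.pySetD acc i
            (PySem.List.pySetD (PySem.List.pyGetD acc i []) j 1)) m)
        ((PySem.List.pyRange 0 n 1).map (fun _ => row0))
      = (PySem.List.pyRange 0 (k : Int) 1).map
            (fun i => (js i).foldl (fun r j => PySem.List.pySetD r j 1) row0)
          ++ (PySem.List.pyRange (k : Int) n 1).map (fun _ => row0) := by
  intro k
  induction k with
  | zero =>
    intro _
    simp [PySem.List.pyRange_one_eq_nil (le_refl (0 : Int))]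
  | succ k ih =>
    intro hk
    have hk' : (k : Int) ≤ n := by push_cast at hk ⊢; omega
    have hlt : (k : Int) < n := by push_cast at hk; omega
    have hcast : ((k + 1 : Nat) : Int) = (k : Int) + 1 := by push_cast; ring
    rw [hcast, PySem.List.pyRange_one_succ_right (by positivity), List.foldl_append,
        List.foldl_cons, List.foldl_nil, ih hk']
    rw [PySem.List.pyRange_one_cons hlt, List.map_cons]
    have hplen : ((PySem.List.pyRange 0 (k : Int) 1).map
        (fun i => (js i).foldl (fun r j => PySem.List.pySetD r j 1) row0)).length = k := by
      simp [PySem.List.length_pyRange_one]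
    rw [matrix_inner _ _ k (by simp [hplen])]
    have hget2 : ∀ (pre rest : List (List Int)) (r : List Int), pre.length = k →
        (pre ++ r :: rest).getD k [] = r := by
      intro pre rest r hp
      rw [← hp]
      simp [List.getD_eq_getElem?_getD]
    have hset2 : ∀ (pre rest : List (List Int)) (r v : List Int), pre.length = k →
        (pre ++ r :: rest).set k v = pre ++ v :: rest := by
      intro pre rest r v hp
      rw [← hp]
      simp [List.set_append_right]
    rw [hget2 _ _ _ hplen, hset2 _ _ _ _ hplen]
    simp

-- The row-level loop fills positions [s, e) with 1s.
lemma inner_fold : ∀ (k : Nat) (s e : Int) (row : List Int), 0 ≤ s → s ≤ e →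
    e ≤ (row.length : Int) → (e - s).toNat = k →
    (PySem.List.pyRange s e 1).foldl (fun r j => PySem.List.pySetD r j 1) row
      = row.take s.toNat ++ List.replicate (e - s).toNat 1 ++ row.drop e.toNat := by
  intro k
  induction k with
  | zero =>
    intro s e row hs hse hlen hk
    have he : e = s := by omega
    subst he
    simp [PySem.List.pyRange_one_eq_nil le_rfl]
  | succ k ih =>
    intro s e row hs hse hlen hk
    have hlt : s < e := by omega
    have hslen : s.toNat < row.length := by omega
    rw [PySem.List.pyRange_one_cons hlt, List.foldl_cons,
        PySem.List.pySetD_of_nonneg row 1 hs,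
        ih (s + 1) e (row.set s.toNat 1) (by omega) (by omega) (by simp; omega) (by omega)]
    rw [show (s + 1).toNat = s.toNat + 1 by omega]
    rw [List.drop_set_of_lt (by omega)]
    rw [show (row.set s.toNat 1).take (s.toNat + 1) = row.take s.toNat ++ [1] by
          rw [List.set_eq_take_cons_drop 1 hslen, List.take_append]
          simp [List.take_take, List.length_take, hslen.le]]
    rw [show (e - s).toNat = (e - (s + 1)).toNat + 1 by omega, List.replicate_succ]
    simp

-- The filled row, written as a per-position map.
lemma row_eq_map (n d : Int) (h0 : 0 ≤ d) (h2 : 2 * d ≤ n) :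
    List.replicate d.toNat (0 : Int) ++ List.replicate (n - 2 * d).toNat 1
        ++ List.replicate d.toNat 0
      = (PySem.List.pyRange 0 n 1).map
          (fun j => if d ≤ j ∧ j < n - d then (1 : Int) else 0) := by
  apply List.ext_getElem
  · simp [PySem.List.length_pyRange_one]; omega
  · intro j hj hj'
    have hjn : j < n.toNat := by
      simpa [PySem.List.length_pyRange_one] using hj'
    simp only [List.getElem_map, PySem.List.getElem_pyRange_one, zero_add,
      List.getElem_append, List.length_append, List.length_replicate,
      List.getElem_replicate]
    split_ifs <;> omega

-- Transposing a rectangular nonempty column list.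
lemma zipStar_rect : ∀ (m : Nat) (cols : List (List Int)), cols ≠ [] →
    (∀ c ∈ cols, c.length = m) →
    pvZipStar cols = (List.range m).map (fun k => cols.map (fun c => c.getD k 0)) := by
  intro m
  induction m with
  | zero =>
    intro cols hne hlen
    rw [pvZipStar]
    have : cols.any List.isEmpty = true := by
      obtain ⟨c, rest, rfl⟩ := List.exists_cons_of_ne_nil hne
      simp [List.any_cons, List.length_eq_zero_iff.mp (hlen c List.mem_cons_self)]
    simp [this]
  | succ m ih =>
    intro cols hne hlen
    rw [pvZipStar]
    have hc1 : cols.isEmpty = false := by simp [hne]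
    have hc2 : cols.any List.isEmpty = false := by
      simp only [List.any_eq_false]
      intro c hc
      have := hlen c hc
      simp [List.isEmpty_iff]
      intro h; rw [h] at this; simp at this
    rw [dif_neg (by simp [hc1, hc2])]
    have htne : cols.map List.tail ≠ [] := by simpa using hne
    have htlen : ∀ c ∈ cols.map List.tail, c.length = m := by
      intro c hc
      obtain ⟨c', hc', rfl⟩ := List.mem_map.mp hc
      have := hlen c' hc'
      simp [List.length_tail, this]
    rw [ih (cols.map List.tail) htne htlen]
    rw [List.range_succ_eq_map, List.map_cons, List.map_map]
    congr 1
    · apply List.map_congr_left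
      intro c hc
      have hl := hlen c hc
      have hcne : c ≠ [] := by intro h; subst h; simp at hl
      obtain ⟨x, t, rfl⟩ := List.exists_cons_of_ne_nil hcne
      simp
    · apply List.map_congr_left
      intro k _
      simp only [Function.comp, List.map_map]
      apply List.map_congr_left
      intro c hc
      have hl := hlen c hc
      have hcne : c ≠ [] := by intro h; subst h; simp at hl
      obtain ⟨x, t, rfl⟩ := List.exists_cons_of_ne_nil hcne
      simp

-- Reading a zero/one/zero block column at position k.
lemma getD_blocks (a b c : Nat) (k : Nat) :
    (List.replicate a (0 : Int) ++ List.replicate b 1 ++ List.replicate c 0).getD k 0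
      = if a ≤ k ∧ k < a + b then (1 : Int) else 0 := by
  by_cases hk : k < a + b + c
  · rw [List.getD_eq_getElem _ _ (by simp; omega)]
    simp only [List.getElem_append, List.length_append, List.length_replicate,
      List.getElem_replicate]
    split_ifs <;> omega
  · rw [List.getD_eq_getElem?_getD, List.getElem?_eq_none (by simp; omega)]
    rw [if_neg (by omega)]
    rfl

-- Row-major filled rows coincide with the transposed column-major matrix.
lemma main_eq (N : Int) (hN : 0 < N) (c : Int)
    (hc : ∀ k : Int, 0 ≤ k → k < N → 2 * |k - c| ≤ N) :
    (PySem.List.pyRange 0 N 1).map (fun i =>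
        List.replicate (|i - c|).toNat (0 : Int)
          ++ List.replicate (N - 2 * |i - c|).toNat 1
          ++ List.replicate (|i - c|).toNat 0)
      = (List.range N.toNat).map (fun k =>
          ((PySem.List.pyRange 0 N 1).map (fun j =>
              PySem.List.pyRepeat [0] (c - min j (N - 1 - j))
                ++ PySem.List.pyRepeat [1] (2 * min j (N - 1 - j) + 1)
                ++ PySem.List.pyRepeat [0] (N - 1 - c - min j (N - 1 - j)))).map
            (fun col => col.getD k 0)) := by
  apply List.ext_getElem
  · simp [PySem.List.length_pyRange_one]
  · intro k hk hk'
    have hkN : k < N.toNat := by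
      simpa [PySem.List.length_pyRange_one] using hk
    simp only [List.getElem_map, List.getElem_range, PySem.List.getElem_pyRange_one,
      zero_add, List.map_map]
    have hd0 : (0 : Int) ≤ |(k : Int) - c| := abs_nonneg _
    have h2d : 2 * |(k : Int) - c| ≤ N := hc k (by omega) (by omega)
    rw [row_eq_map N (|(k : Int) - c|) hd0 h2d]
    apply List.map_congr_left
    intro j hj
    rw [PySem.List.mem_pyRange_one] at hj
    simp only [Function.comp, PySem.List.pyRepeat_singleton]
    rw [getD_blocks]
    have hr0 : 0 ≤ min j (N - 1 - j) := by omega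
    have hcr : 0 ≤ c - min j (N - 1 - j) := by
      have hN1 := hc (N - 1) (by omega) (by omega)
      have e1 := le_abs_self ((N - 1) - c)
      have e2 := neg_abs_le ((N - 1) - c)
      omega
    rcases abs_cases ((k : Int) - c) with ⟨h1, _⟩ | ⟨h1, _⟩ <;> rw [h1] <;>
      split_ifs <;> omega

-- ===== VERDICT =====
theorem make_check_matrix_spec : Claim_equal_make_check_matrix := by
  unfold Claim_equal_make_check_matrix Spec_make_check_matrix
  intro n _
  unfold make_check_matrix make_check_matrix_alt
  by_cases hn : n ≤ 0
  · rw [PySem.List.pyRange_one_eq_nil hn]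
    simp [pvZipStar]
  · rw [not_le] at hn
    have hnn : ((n.toNat : Nat) : Int) = n := by omega
    simp only []
    rw [PySem.Int.floordiv_eq_ediv_of_pos (by norm_num)]
    -- B side: transpose of the rectangular column list
    rw [zipStar_rect n.toNat _
        (by
          intro h
          have := congrArg List.length h
          simp [PySem.List.length_pyRange_one] at this
          omega)
        (by
          intro col hcol
          obtain ⟨j, hj, rfl⟩ := List.mem_map.mp hcol
          rw [PySem.List.mem_pyRange_one] at hj
          simp only [List.length_append, PySem.List.pyRepeat_singleton,
            List.length_replicate]
          omega)]
    -- A side: the double fold is the row-major matrix of filled rows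
    rw [show n = ((n.toNat : Nat) : Int) from hnn.symm]
    rw [outer_fold ((n.toNat : Nat) : Int)
        (fun i => PySem.List.pyRange |i - ((n.toNat : Nat) : Int) / 2|
            (((n.toNat : Nat) : Int) - |i - ((n.toNat : Nat) : Int) / 2|) 1)
        (PySem.List.pyRepeat [0] ((n.toNat : Nat) : Int)) n.toNat (le_refl _)]
    rw [PySem.List.pyRange_one_eq_nil (le_refl _)]
    rw [List.map_nil, List.append_nil]
    rw [show (PySem.List.pyRange 0 ((n.toNat : Nat) : Int) 1).map
          (fun i => (PySem.List.pyRange |i - ((n.toNat : Nat) : Int) / 2|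
              (((n.toNat : Nat) : Int) - |i - ((n.toNat : Nat) : Int) / 2|) 1).foldl
            (fun r j => PySem.List.pySetD r j 1)
            (PySem.List.pyRepeat [0] ((n.toNat : Nat) : Int)))
        = (PySem.List.pyRange 0 ((n.toNat : Nat) : Int) 1).map (fun i =>
            List.replicate (|i - ((n.toNat : Nat) : Int) / 2|).toNat (0 : Int)
              ++ List.replicate (((n.toNat : Nat) : Int)
                  - 2 * |i - ((n.toNat : Nat) : Int) / 2|).toNat 1
              ++ List.replicate (|i - ((n.toNat : Nat) : Int) / 2|).toNat 0) from ?_]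
    · rw [main_eq ((n.toNat : Nat) : Int) (by omega) _
          (by
            intro k hk0 hkN
            rcases abs_cases (k - ((n.toNat : Nat) : Int) / 2) with ⟨h1, _⟩ | ⟨h1, _⟩ <;> omega)]
    · apply List.map_congr_left
      intro i hi
      rw [PySem.List.mem_pyRange_one] at hi
      obtain ⟨hi0, hin⟩ := hi
      set d : Int := |i - ((n.toNat : Nat) : Int) / 2| with hd
      have hd0 : 0 ≤ d := abs_nonneg _
      have hd2 : 2 * d ≤ ((n.toNat : Nat) : Int) := by
        rw [hd]
        rcases abs_cases (i - ((n.toNat : Nat) : Int) / 2) with ⟨h1, h2⟩ | ⟨h1, h2⟩ <;> omega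
      simp only [PySem.List.pyRepeat_singleton]
      rw [inner_fold ((((n.toNat : Nat) : Int) - d) - d).toNat d (((n.toNat : Nat) : Int) - d)
          (List.replicate (((n.toNat : Nat) : Int)).toNat 0) hd0 (by omega)
          (by simp [List.length_replicate]; omega) rfl]
      rw [List.take_replicate, List.drop_replicate]
      rw [show min d.toNat (((n.toNat : Nat) : Int)).toNat = d.toNat by omega,
          show ((((n.toNat : Nat) : Int) - d) - d).toNat
              = (((n.toNat : Nat) : Int) - 2 * d).toNat by omega,
          show (((n.toNat : Nat) : Int)).toNat - ((((n.toNat : Nat) : Int)) - d).toNat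
              = d.toNat by omega]
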